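-- pv_equiv track=rewrite | github.com/ChandTheMan/Slowker | slowker.py | pairCheck
-- ===== SOURCE A (Python) =====
-- def pairCheck(hand):    #sorted hand required
--     pairList = []
--     for i in range(len(hand)-1):
--         try:
--             if hand[i][0] == hand[i+1][0] and hand[i+1][0] != pairList[-1]:
--                 pairList.append(hand[i][0])
--         except IndexError:
--             if hand[i][0] == hand[i+1][0]:
--                 pairList.append(hand[i][0])
--     if len(pairList) == 0:
--         return False
--     if len(pairList) <= 2:
--         return pairList
--     return [pairList[-2], pairList[-1]]
-- ===== SOURCE B (Python) =====
-- def pairCheck(hand):    # sorted hand required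
--     # Run-length decomposition: split the rank sequence into maximal runs of
--     # equal ranks; a run of length >= 2 yields a pair candidate, and taking
--     # run keys of the candidate list collapses consecutive duplicate ranks.
--     ranks = [c[0] for c in hand]
--
--     def runs(xs):
--         out = []
--         i = 0
--         while i < len(xs):
--             j = i + 1
--             while j < len(xs) and xs[j] == xs[i]:
--                 j += 1
--             out.append((xs[i], j - i))
--             i = j
--         return out
--
--     kept = [k for k, n in runs(ranks) if n >= 2]
--     pairList = [k for k, _ in runs(kept)]   # run keys = consecutive-dup collapse
--     return pairList[-2:] if pairList else False
-- ===== Notes on version B (the rewrite author's own statement) =====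
-- stated objective: alternative
-- what changed: Replaces A's single adjacent-pair index scan with try/except lookback-dedup by a run-length decomposition: the rank sequence is split into maximal runs, runs of length >= 2 yield candidate ranks, a second run decomposition of the candidates collapses consecutive duplicates, and the result is the last-two slice; Pre_ excludes hands with no adjacent equal-rank pair (both programs return False, outside the declared Optional[list[str]] type) and hands containing an empty-string card (both raise IndexError, except degenerate short hands where A returns False without indexing and B raises).
-- outside the precondition, e.g. on pairCheck([]): A returns False, B returns False; on pairCheck(['2S', '3D', '5H']): A returns False, B returns False; on pairCheck(['']): A returns False, B raises IndexError
import Mathlib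
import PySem

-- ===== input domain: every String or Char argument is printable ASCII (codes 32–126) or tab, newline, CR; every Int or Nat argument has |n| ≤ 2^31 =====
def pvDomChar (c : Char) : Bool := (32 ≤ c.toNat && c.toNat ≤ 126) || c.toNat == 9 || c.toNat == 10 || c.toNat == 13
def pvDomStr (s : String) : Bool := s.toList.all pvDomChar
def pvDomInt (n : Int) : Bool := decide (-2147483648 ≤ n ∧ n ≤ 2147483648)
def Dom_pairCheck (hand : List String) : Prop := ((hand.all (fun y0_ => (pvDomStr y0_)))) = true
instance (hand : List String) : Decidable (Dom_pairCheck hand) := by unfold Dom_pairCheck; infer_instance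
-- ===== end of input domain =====

-- B replaces A's adjacent-pair index scan (try/except lookback dedup) by a run-length
-- decomposition of the rank sequence: runs of length >= 2 yield candidate ranks, a second run
-- decomposition collapses consecutive duplicate candidates, and the last-two slice is returned
-- (objective: alternative; same O(n) cost). Ranks (Python 1-character strings hand[i][0]) are
-- carried as Char and rendered back to singleton Strings in the result.

-- ===== PORT A =====
-- loop body of A's `for i in range(len(hand)-1)`; pl = pairList so far, a = hand[i], b = hand[i+1].
-- The fallthrough `| _, _ => pl` is the uncaught IndexError of `hand[i][0]` on an empty string
-- (re-raised inside `except`); those inputs are excluded by Pre_pairCheck.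
def pairCheckStep (pl : List Char) (a b : String) : List Char :=
  match PySem.Str.pyGet? a 0, PySem.Str.pyGet? b 0 with
  | some c1, some c2 =>
      (match PySem.List.pyGet? pl (-1) with
       | some last => if c1 == c2 && c2 != last then pl ++ [c1] else pl   -- try branch
       | none => if c1 == c2 then pl ++ [c1] else pl)                     -- except IndexError (pairList empty)
  | _, _ => pl

def pairCheck (hand : List String) : Option (List String) :=
  let pl := (PySem.List.pyRange 0 ((hand.length : Int) - 1) 1).foldl
      (fun pl i => pairCheckStep pl (PySem.List.pyGetD hand i "") (PySem.List.pyGetD hand (i+1) "")) []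
  if pl.length = 0 then none
  else if pl.length ≤ 2 then some (pl.map (fun c => String.ofList [c]))
  else some [String.ofList [PySem.List.pyGetD pl (-2) ' '], String.ofList [PySem.List.pyGetD pl (-1) ' ']]

-- ===== PORT B =====
-- Source B's `c[0]`: exact for nonempty cards (guaranteed by Pre_pairCheck; Python raises on "").
def headRank (s : String) : Char := (PySem.Str.pyGet? s 0).getD ' '

-- Source B's inner while loop of runs(): number of leading elements of t equal to k
def runLen (k : Char) : List Char → Nat
  | [] => 0
  | c :: t => if c == k then 1 + runLen k t else 0

-- Source B's outer while loop of runs(): maximal runs (key, length), advancing i to j = i + run length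
def runsOf : List Char → List (Char × Nat)
  | [] => []
  | k :: t =>
      let n := 1 + runLen k t
      (k, n) :: runsOf ((k :: t).drop n)
termination_by xs => xs.length
decreasing_by simp

def pairCheck_alt (hand : List String) : Option (List String) :=
  let ranks := hand.map headRank
  let kept := (runsOf ranks).filterMap (fun p => if 2 ≤ p.2 then some p.1 else none)
  let pairList := (runsOf kept).map Prod.fst
  if pairList.isEmpty then none
  else some ((PySem.List.slice pairList (some (-2)) none).map (fun c => String.ofList [c]))

-- ===== PRECONDITION & SPEC =====
-- Pre_ excludes (a) hands containing an empty-string card — with at least two cards hand[i][0]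
-- raises IndexError uncaught (B's c[0] raises too); on degenerate short hands A returns False
-- while B still raises — and (b) hands with no adjacent equal-rank pair, where both programs
-- return False, a value outside the declared return type Optional[list[str]].
def Pre_pairCheck (hand : List String) : Prop :=
  (∀ s ∈ hand, s ≠ "") ∧
  ∃ p ∈ hand.zip hand.tail, PySem.Str.pyGet? p.1 0 = PySem.Str.pyGet? p.2 0
instance (hand : List String) : Decidable (Pre_pairCheck hand) := by unfold Pre_pairCheck; infer_instance
def pvWitness_pairCheck : List String := ["2S", "2D", "3H", "3C", "5S"]

def Spec_pairCheck (hand : List String) (out : Option (List String)) : Prop := out = pairCheck_alt hand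
instance (hand : List String) (out : Option (List String)) : Decidable (Spec_pairCheck hand out) := by unfold Spec_pairCheck; infer_instance

-- ===== CLAIM (what is proved, stated in full; the proofs are below) =====
def Claim_equal_pairCheck : Prop := ∀ (hand : List String), Dom_pairCheck hand → Pre_pairCheck hand → Spec_pairCheck hand (pairCheck hand)

-- ===== LEMMAS AND PROOFS =====

-- A's per-pair step, on rank characters (after the heads are extracted)
def adjStep (pl : List Char) (c1 c2 : Char) : List Char :=
  if c1 == c2 && pl.getLast? != some c2 then pl ++ [c1] else pl

-- consecutive-duplicate collapse parameterised by the last emitted element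
def dedupFrom : Option Char → List Char → List Char
  | _, [] => []
  | o, k :: t => if o = some k then dedupFrom o t else k :: dedupFrom (some k) t

-- the kept candidate ranks of Source B, as a function of the rank list
def keptK (rs : List Char) : List Char :=
  (runsOf rs).filterMap (fun p => if 2 ≤ p.2 then some p.1 else none)

-- shift an index fold by one
theorem foldl_pyRange_succ (g : List Char → Int → List Char) (b : Int) (pl : List Char) :
    (PySem.List.pyRange 1 (b+1) 1).foldl g pl
      = (PySem.List.pyRange 0 b 1).foldl (fun pl i => g pl (i+1)) pl := by
  simp [PySem.List.pyRange_one, List.foldl_map]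
  congr 1
  funext pl k
  ring_nf

theorem pyGetD_cons_succ (x : String) (xs : List String) (i : Int) (h : 0 ≤ i) (d : String) :
    PySem.List.pyGetD (x :: xs) (i+1) d = PySem.List.pyGetD xs i d := by
  rw [PySem.List.pyGetD_of_nonneg _ _ (by omega), PySem.List.pyGetD_of_nonneg _ _ h]
  have : (i+1).toNat = i.toNat + 1 := by omega
  rw [this]
  rfl

-- A's index loop over range(len(hand)-1) is a fold over the adjacent pairs of the hand
theorem foldl_range_pairs (f : List Char → String → String → List Char) :
    ∀ (xs : List String) (pl : List Char),
    (PySem.List.pyRange 0 ((xs.length : Int) - 1) 1).foldl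
      (fun pl i => f pl (PySem.List.pyGetD xs i "") (PySem.List.pyGetD xs (i+1) "")) pl
    = (xs.zip xs.tail).foldl (fun pl ab => f pl ab.1 ab.2) pl := by
  intro xs
  induction xs with
  | nil =>
    intro pl
    have h : (((([] : List String)).length : Int)) - 1 ≤ 0 := by simp
    rw [PySem.List.pyRange_one_eq_nil h]
    rfl
  | cons x t ih =>
    intro pl
    match t with
    | [] =>
      have h : ((([x] : List String)).length : Int) - 1 ≤ 0 := by simp
      rw [PySem.List.pyRange_one_eq_nil h]
      rfl
    | y :: u =>
      have hlen : (0:Int) < ((x :: y :: u).length : Int) - 1 := by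
        simp only [List.length_cons]; omega
      rw [PySem.List.pyRange_one_cons hlen]
      simp only [List.foldl_cons, zero_add]
      have h0 : PySem.List.pyGetD (x :: y :: u) 0 "" = x := by
        rw [PySem.List.pyGetD_ofNat' _ 0]; rfl
      have h1 : PySem.List.pyGetD (x :: y :: u) 1 "" = y := by
        rw [PySem.List.pyGetD_ofNat' _ 1]; rfl
      rw [h0, h1]
      have hb : ((x :: y :: u).length : Int) - 1 = (((y :: u).length : Int) - 1) + 1 := by
        simp only [List.length_cons]; omega
      rw [hb, foldl_pyRange_succ]
      have hcong : ∀ (init : List Char),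
          (PySem.List.pyRange 0 (((y :: u).length : Int) - 1) 1).foldl
          (fun pl i => f pl (PySem.List.pyGetD (x :: y :: u) (i+1) "")
                            (PySem.List.pyGetD (x :: y :: u) (i+1+1) "")) init
        = (PySem.List.pyRange 0 (((y :: u).length : Int) - 1) 1).foldl
          (fun pl i => f pl (PySem.List.pyGetD (y :: u) i "") (PySem.List.pyGetD (y :: u) (i+1) "")) init := by
        intro init
        apply PySem.List.foldl_congr_mem
        intro acc i hi
        have h0i : 0 ≤ i := ((PySem.List.mem_pyRange_one).mp hi).1
        rw [pyGetD_cons_succ _ _ _ h0i, pyGetD_cons_succ _ _ _ (by omega)]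
      rw [hcong (f pl x y), ih (f pl x y)]
      rfl

-- the head of a nonempty Python string, via pyGet?
theorem pyGet?_head (s : String) (hs : s ≠ "") :
    PySem.Str.pyGet? s 0 = some (headRank s) := by
  have hs' : s.toList ≠ [] := fun hn => hs (String.toList_inj.mp (by simp [hn]))
  obtain ⟨c, cs, hc⟩ := List.exists_cons_of_ne_nil hs'
  have g : PySem.Str.pyGet? s 0 = some c := by
    rw [show (0:Int) = ((0:Nat):Int) from rfl, PySem.Str.pyGet?_natCast, hc]; rfl
  have hhr : headRank s = c := by rw [headRank, g]; rfl
  rw [g, hhr]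

-- A's per-pair step on nonempty cards is adjStep on the head ranks
theorem pairCheckStep_eq_adjStep (pl : List Char) (a b : String) (ha : a ≠ "") (hb : b ≠ "") :
    pairCheckStep pl a b = adjStep pl (headRank a) (headRank b) := by
  have ga := pyGet?_head a ha
  have gb := pyGet?_head b hb
  unfold pairCheckStep adjStep
  rw [ga, gb, PySem.List.pyGet?_neg_one]
  cases hL : pl.getLast? with
  | none => simp
  | some last => simp [bne_comm]

-- unfolding equations of runsOf (well-founded recursion)
theorem runsOf_nil : runsOf [] = [] := by unfold runsOf; rfl

theorem drop_run (k : Char) (t : List Char) :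
    (k :: t).drop (1 + runLen k t) = t.drop (runLen k t) := by
  rw [Nat.add_comm, List.drop_succ_cons]

theorem runsOf_cons (k : Char) (t : List Char) :
    runsOf (k :: t) = (k, 1 + runLen k t) :: runsOf (t.drop (runLen k t)) := by
  conv_lhs => unfold runsOf
  simp only []
  rw [drop_run]

-- unfolding equation for keptK on a cons
theorem keptK_cons (k : Char) (t : List Char) :
    keptK (k :: t) = (if 1 ≤ runLen k t then [k] else []) ++ keptK (t.drop (runLen k t)) := by
  rw [keptK, runsOf_cons]
  simp only [List.filterMap_cons]
  by_cases h : 1 ≤ runLen k t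
  · rw [if_pos (show 2 ≤ 1 + runLen k t by omega), if_pos h]
    rfl
  · rw [if_neg (show ¬ 2 ≤ 1 + runLen k t by omega), if_neg h]
    rfl

-- dedupFrom (some k) skips a leading k
theorem dedupFrom_skip (k : Char) (z : List Char) :
    dedupFrom (some k) (k :: z) = dedupFrom (some k) z := by
  simp [dedupFrom]

-- MAIN INVARIANT: A's adjacent scan from state pl appends exactly the
-- lookback-collapsed kept run keys
theorem dedupFrom_cons (o : Option Char) (k : Char) (t : List Char) :
    dedupFrom o (k :: t) = if o = some k then dedupFrom o t else k :: dedupFrom (some k) t := rfl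

-- MAIN INVARIANT: A's adjacent scan from state pl appends exactly the
-- lookback-collapsed kept run keys
theorem scan_eq_dedup_kept :
    ∀ (rs : List Char) (pl : List Char),
    (rs.zip rs.tail).foldl (fun pl p => adjStep pl p.1 p.2) pl
      = pl ++ dedupFrom pl.getLast? (keptK rs) := by
  intro rs
  induction rs with
  | nil => intro pl; simp [keptK, runsOf_nil, dedupFrom]
  | cons k t ih =>
    intro pl
    match t with
    | [] =>
      have hK : keptK [k] = [] := by
        rw [keptK_cons]
        simp [runLen, keptK, runsOf_nil]
      simp [hK, dedupFrom]
    | x :: u =>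
      simp only [List.tail_cons, List.zip_cons_cons, List.foldl_cons]
      by_cases hx : x = k
      · subst hx
        have hrl : 1 ≤ runLen x (x :: u) := by simp [runLen]
        have hdrop : (x :: u).drop (runLen x (x :: u)) = u.drop (runLen x u) := by
          rw [show runLen x (x :: u) = 1 + runLen x u by simp [runLen], drop_run]
        have hK2 : keptK (x :: x :: u) = x :: keptK (u.drop (runLen x u)) := by
          rw [keptK_cons x (x :: u), if_pos hrl, hdrop]; rfl
        have hK1 := keptK_cons x u
        have ih' := ih (adjStep pl x x)
        simp only [List.tail_cons] at ih'
        by_cases hlast : pl.getLast? = some x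
        · have hstep : adjStep pl x x = pl := by
            unfold adjStep; rw [if_neg (by simp [hlast])]
          rw [hstep] at ih'
          rw [hstep, ih', hK1, hK2, hlast]
          congr 1
          rw [dedupFrom_skip]
          split_ifs with h1
          · rw [List.singleton_append, dedupFrom_skip]
          · simp
        · have hstep : adjStep pl x x = pl ++ [x] := by
            unfold adjStep; rw [if_pos (by simp [hlast])]
          rw [hstep] at ih'
          rw [hstep, ih', hK1, hK2]
          have hlx : (pl ++ [x]).getLast? = some x := by simp
          rw [hlx]
          rw [dedupFrom_cons, if_neg hlast]
          split_ifs with h1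
          · rw [List.singleton_append, dedupFrom_skip]
            simp
          · simp
      · have hrl : runLen k (x :: u) = 0 := by simp [runLen, hx]
        have hstep : adjStep pl k x = pl := by
          unfold adjStep
          rw [if_neg (by simp [Ne.symm hx])]
        have ih' := ih pl
        simp only [List.tail_cons] at ih'
        rw [hstep, ih', keptK_cons k (x :: u), hrl]
        simp

-- dedupFrom (some k) drops the leading run of k's
theorem dedupFrom_some_eq_drop (k : Char) :
    ∀ (t : List Char), dedupFrom (some k) t = dedupFrom none (t.drop (runLen k t)) := by
  intro t
  induction t with
  | nil => rfl
  | cons c u ih =>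
    by_cases hc : c = k
    · subst hc
      rw [dedupFrom_skip, ih,
          show runLen c (c :: u) = 1 + runLen c u from by simp [runLen], drop_run]
    · have : runLen k (c :: u) = 0 := by simp [runLen, hc]
      rw [this, List.drop_zero, dedupFrom_cons, if_neg (by simp [Ne.symm hc]), dedupFrom_cons,
          if_neg (by simp)]

-- B's second runs() pass computes the consecutive-duplicate collapse
theorem runs_map_fst : ∀ (ks : List Char), (runsOf ks).map Prod.fst = dedupFrom none ks
  | [] => by rw [runsOf_nil]; rfl
  | k :: t => by
      rw [runsOf_cons, List.map_cons, runs_map_fst (t.drop (runLen k t)),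
          dedupFrom_cons, if_neg (by simp), dedupFrom_some_eq_drop]
termination_by ks => ks.length
decreasing_by simp

-- a hand with an adjacent equal-rank pair has a kept run
theorem keptK_ne_nil : ∀ (rs : List Char), (∃ p ∈ rs.zip rs.tail, p.1 = p.2) → keptK rs ≠ [] := by
  intro rs
  induction rs with
  | nil => rintro ⟨p, hp, -⟩ _; simp at hp
  | cons k t ih =>
    match t with
    | [] => rintro ⟨p, hp, -⟩ _; simp at hp
    | x :: u =>
      rintro ⟨p, hp, heq⟩
      by_cases hx : x = k
      · subst hx
        rw [keptK_cons, if_pos (by simp [runLen])]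
        simp
      · simp only [List.tail_cons, List.zip_cons_cons] at hp
        rcases List.mem_cons.mp hp with h | h
        · exfalso; rw [h] at heq; exact hx heq.symm
        · have hrl : runLen k (x :: u) = 0 := by simp [runLen, hx]
          rw [keptK_cons, hrl]
          simpa using ih ⟨p, h, heq⟩

-- the last-two tail: A's tri-branch equals pl[-2:]
theorem tail_slice (pl : List Char) (hne : pl ≠ []) :
    (if pl.length = 0 then (none : Option (List String))
     else if pl.length ≤ 2 then some (pl.map (fun c => String.ofList [c]))
     else some [String.ofList [PySem.List.pyGetD pl (-2) ' '], String.ofList [PySem.List.pyGetD pl (-1) ' ']])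
    = some ((PySem.List.slice pl (some (-2)) none).map (fun c => String.ofList [c])) := by
  have hs : PySem.List.slice pl (some (-2)) none = pl.drop (pl.length - 2) :=
    PySem.List.slice_from_neg_ofNat pl 2 (by omega)
  rw [hs]
  have hlen0 : pl.length ≠ 0 := by simpa using hne
  by_cases h2 : pl.length ≤ 2
  · have : pl.length - 2 = 0 := by omega
    simp [hlen0, h2, this]
  · have hlt : pl.length - 2 < pl.length := by omega
    have hlt1 : pl.length - 2 + 1 < pl.length := by omega
    rw [List.drop_eq_getElem_cons hlt, List.drop_eq_getElem_cons hlt1,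
        List.drop_eq_nil_of_le (by omega)]
    have e2 : PySem.List.pyGetD pl (-2) ' ' = pl[pl.length - 2] :=
      PySem.List.pyGetD_neg_ofNat pl 2 ' ' (by omega) (by omega)
    have e1 : PySem.List.pyGetD pl (-1) ' ' = pl[pl.length - 1] :=
      PySem.List.pyGetD_neg_ofNat pl 1 ' ' (by omega) (by omega)
    have hidx : pl.length - 2 + 1 = pl.length - 1 := by omega
    simp [hlen0, h2, e2, e1, hidx]

-- ===== VERDICT (by name: the statement is the Claim_ definition above) =====
theorem pairCheck_spec : Claim_equal_pairCheck := by
  intro hand _ hpre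
  obtain ⟨hne, q, hq, heq⟩ := hpre
  unfold Spec_pairCheck pairCheck
  rw [foldl_range_pairs pairCheckStep hand []]
  -- reduce A's fold over card pairs to the fold of adjStep over rank pairs
  have hzipmap : (hand.map headRank).zip ((hand.map headRank).tail)
      = (hand.zip hand.tail).map (Prod.map headRank headRank) := by
    rw [← List.map_tail, List.zip_map]
  have hfold : (hand.zip hand.tail).foldl (fun pl ab => pairCheckStep pl ab.1 ab.2) []
      = (((hand.map headRank).zip ((hand.map headRank).tail)).foldl
          (fun pl p => adjStep pl p.1 p.2) []) := by
    rw [hzipmap, List.foldl_map]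
    apply PySem.List.foldl_congr_mem
    intro acc p hp
    obtain ⟨h1, h2⟩ := List.of_mem_zip hp
    exact pairCheckStep_eq_adjStep acc p.1 p.2 (hne _ h1) (hne _ (List.mem_of_mem_tail h2))
  rw [hfold, scan_eq_dedup_kept, List.nil_append, List.getLast?_nil]
  -- nonemptiness from the witness pair
  have hq' : Prod.map headRank headRank q ∈ (hand.map headRank).zip ((hand.map headRank).tail) := by
    rw [hzipmap]; exact List.mem_map_of_mem hq
  obtain ⟨hq1, hq2⟩ := List.of_mem_zip hq
  have hr : (Prod.map headRank headRank q).1 = (Prod.map headRank headRank q).2 := by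
    have g1 := pyGet?_head q.1 (hne _ hq1)
    have g2 := pyGet?_head q.2 (hne _ (List.mem_of_mem_tail hq2))
    have := heq
    rw [g1, g2] at this
    simpa using this
  have hkept : keptK (hand.map headRank) ≠ [] := keptK_ne_nil _ ⟨_, hq', hr⟩
  have hdne : dedupFrom none (keptK (hand.map headRank)) ≠ [] := by
    obtain ⟨c, z, hc⟩ := List.exists_cons_of_ne_nil hkept
    rw [hc, dedupFrom_cons, if_neg (by simp)]
    simp
  -- B's side: second runs() pass = the collapse
  have hB : pairCheck_alt hand
      = (if (dedupFrom none (keptK (hand.map headRank))).isEmpty then none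
         else some ((PySem.List.slice (dedupFrom none (keptK (hand.map headRank))) (some (-2)) none).map
                      (fun c => String.ofList [c]))) := by
    simp only [pairCheck_alt]
    rw [runs_map_fst]
    rfl
  rw [hB, tail_slice _ hdne]
  simp [List.isEmpty_iff, hdne]
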